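-- pv_equiv track=rewrite | github.com/user234683/youtube-local | youtube/watch.py | get_ordered_music_list_attributes
-- ===== SOURCE A (Python) =====
-- def get_ordered_music_list_attributes(music_list):
--     # get the set of attributes which are used by atleast 1 track
--     # so there isn't an empty, extraneous album column which no tracks use, for example
--     used_attributes = set()
--     for track in music_list:
--         used_attributes = used_attributes | track.keys()
--
--     # now put them in the right order
--     ordered_attributes = []
--     for attribute in ('Artist', 'Title', 'Album'):
--         if attribute.lower() in used_attributes:
--             ordered_attributes.append(attribute)
--
--     return ordered_attributes
-- ===== SOURCE B (Python) =====
-- def get_ordered_music_list_attributes(music_list):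
--     return [attribute for attribute in ('Artist', 'Title', 'Album')
--             if any(attribute.lower() in track for track in music_list)]
-- ===== Notes on version B (the rewrite author's own statement) =====
-- stated objective: simpler
-- what changed: Drops the intermediate union-of-keys set: for each of the three fixed attributes B scans the tracks with a short-circuiting any() membership test, so no key set is ever built.
import Mathlib
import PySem

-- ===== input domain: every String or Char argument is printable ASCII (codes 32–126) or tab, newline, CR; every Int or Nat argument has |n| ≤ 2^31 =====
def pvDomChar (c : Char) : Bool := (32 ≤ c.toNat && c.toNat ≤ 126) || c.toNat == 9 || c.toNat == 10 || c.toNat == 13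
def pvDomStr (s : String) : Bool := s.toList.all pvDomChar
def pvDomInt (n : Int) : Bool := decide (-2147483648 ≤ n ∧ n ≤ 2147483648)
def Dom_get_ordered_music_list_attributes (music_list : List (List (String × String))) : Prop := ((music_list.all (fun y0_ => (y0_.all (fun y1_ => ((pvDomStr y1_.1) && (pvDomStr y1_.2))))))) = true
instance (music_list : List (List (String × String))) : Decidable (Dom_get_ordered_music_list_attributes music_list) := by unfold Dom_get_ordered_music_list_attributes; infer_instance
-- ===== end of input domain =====

-- B replaces A's intermediate union-of-keys set by a direct per-attribute any()-scan of the tracks (objective: simpler).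

-- ===== PORT A =====
def get_ordered_music_list_attributes (music_list : List (List (String × String))) : List String :=
  -- used_attributes = set(); for track: used_attributes = used_attributes | track.keys()
  let used_attributes : PySem.Set String :=
    music_list.foldl (fun s track => PySem.Set.union s (track.map Prod.fst)) PySem.Set.empty
  -- ordered_attributes accumulation over the fixed tuple
  (["Artist", "Title", "Album"] : List String).foldl
    (fun ordered_attributes attr =>
      if PySem.Set.contains used_attributes (PySem.Str.lower attr) then
        ordered_attributes ++ [attr]
      else ordered_attributes) []

-- ===== PORT B =====
def get_ordered_music_list_attributes_alt (music_list : List (List (String × String))) : List String :=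
  -- [attr for attr in (...) if any(attr.lower() in track for track in music_list)]
  (["Artist", "Title", "Album"] : List String).filter
    (fun attr =>
      music_list.any (fun track => track.any (fun kv => kv.1 == PySem.Str.lower attr)))

-- ===== PRECONDITION & SPEC =====
def Spec_get_ordered_music_list_attributes (music_list : List (List (String × String))) (out : List String) : Prop := out = get_ordered_music_list_attributes_alt music_list
instance (music_list : List (List (String × String))) (out : List String) : Decidable (Spec_get_ordered_music_list_attributes music_list out) := by unfold Spec_get_ordered_music_list_attributes; infer_instance

-- ===== CLAIM (what is proved, stated in full; the proofs are below) =====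
def Claim_equal_get_ordered_music_list_attributes : Prop := ∀ (music_list : List (List (String × String))), Dom_get_ordered_music_list_attributes music_list → Spec_get_ordered_music_list_attributes music_list (get_ordered_music_list_attributes music_list)

-- ===== LEMMAS AND PROOFS =====

lemma mem_foldl_union (x : String) (ml : List (List (String × String))) (s : PySem.Set String) :
    x ∈ ml.foldl (fun s track => PySem.Set.union s (track.map Prod.fst)) s ↔
      x ∈ s ∨ ∃ t ∈ ml, ∃ kv ∈ t, kv.1 = x := by
  induction ml generalizing s with
  | nil => simp
  | cons t rest ih =>
    simp only [List.foldl_cons, ih, PySem.Set.mem_union, List.mem_map, List.mem_cons]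
    aesop

-- ===== VERDICT (by name: the statement is the Claim_ definition above) =====
theorem get_ordered_music_list_attributes_spec : Claim_equal_get_ordered_music_list_attributes := by
  intro music_list _
  unfold Spec_get_ordered_music_list_attributes
  unfold get_ordered_music_list_attributes get_ordered_music_list_attributes_alt
  rw [PySem.List.foldl_append_if_eq_filter]
  simp only [List.nil_append]
  apply List.filter_congr
  intro a _
  rw [Bool.eq_iff_iff]
  simp only [PySem.Set.contains, List.contains_iff_mem, mem_foldl_union,
    PySem.Set.empty, List.not_mem_nil, false_or, List.any_eq_true, beq_iff_eq]
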